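-- pv_equiv track=rewrite | github.com/oyviasp/tool_calling_agent_with_rag | tools.py | format_hierarchy_sample
-- ===== SOURCE A (Python) =====
-- def format_hierarchy_sample(node_id, nodes, children, indent=0, max_depth=4, nodes_shown=0, max_nodes=100):
--     """
--     Format a sample of the hierarchy for LLM context
--     """
--     if indent > max_depth or nodes_shown >= max_nodes:
--         return ""
--
--     node_info = nodes.get(node_id, {})
--     desc = node_info.get('desc', '')
--
--     prefix = "  " * indent
--     result = f"{prefix}{node_id}: {desc}\n"
--
--     # Show only first few children to keep sample manageable
--     node_children = children.get(node_id, [])[:3]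
--     for child_id in node_children:
--         if nodes_shown < max_nodes:
--             result += format_hierarchy_sample(child_id, nodes, children, indent + 1, max_depth, nodes_shown, max_nodes)
--             nodes_shown += 1
--
--     if len(children.get(node_id, [])) > 3:
--         result += f"{prefix}  ... ({len(children.get(node_id, [])) - 3} more children)\n"
--
--     return result
-- ===== SOURCE B (Python) =====
-- def format_hierarchy_sample(node_id, nodes, children, indent=0, max_depth=4, nodes_shown=0, max_nodes=100):
--     """Iterative DFS with an explicit stack of frames instead of recursion."""
--     out = []
--     stack = [("node", node_id, indent, nodes_shown)]
--     while stack: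
--         frame = stack.pop()
--         if frame[0] == "text":
--             out.append(frame[1])
--             continue
--         _, nid, ind, shown = frame
--         if ind > max_depth or shown >= max_nodes:
--             continue
--         desc = nodes.get(nid, {}).get('desc', '')
--         prefix = "  " * ind
--         out.append(f"{prefix}{nid}: {desc}\n")
--         kids = children.get(nid, [])
--         if len(kids) > 3:
--             stack.append(("text", f"{prefix}  ... ({len(kids) - 3} more children)\n"))
--         new_frames = [("node", child, ind + 1, shown + i)
--                       for i, child in enumerate(kids[:3])]
--         for frame in reversed(new_frames):
--             stack.append(frame)
--     return "".join(out)
-- ===== Notes on version B (the rewrite author's own statement) =====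
-- stated objective: alternative
-- what changed: Replaced A's Python-level recursion with an iterative depth-first traversal over an explicit stack of frames (node frames plus deferred text-sentinel frames for the '... more children' line), collecting output lines in a list joined once at the end, so no call stack is used.
import Mathlib
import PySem

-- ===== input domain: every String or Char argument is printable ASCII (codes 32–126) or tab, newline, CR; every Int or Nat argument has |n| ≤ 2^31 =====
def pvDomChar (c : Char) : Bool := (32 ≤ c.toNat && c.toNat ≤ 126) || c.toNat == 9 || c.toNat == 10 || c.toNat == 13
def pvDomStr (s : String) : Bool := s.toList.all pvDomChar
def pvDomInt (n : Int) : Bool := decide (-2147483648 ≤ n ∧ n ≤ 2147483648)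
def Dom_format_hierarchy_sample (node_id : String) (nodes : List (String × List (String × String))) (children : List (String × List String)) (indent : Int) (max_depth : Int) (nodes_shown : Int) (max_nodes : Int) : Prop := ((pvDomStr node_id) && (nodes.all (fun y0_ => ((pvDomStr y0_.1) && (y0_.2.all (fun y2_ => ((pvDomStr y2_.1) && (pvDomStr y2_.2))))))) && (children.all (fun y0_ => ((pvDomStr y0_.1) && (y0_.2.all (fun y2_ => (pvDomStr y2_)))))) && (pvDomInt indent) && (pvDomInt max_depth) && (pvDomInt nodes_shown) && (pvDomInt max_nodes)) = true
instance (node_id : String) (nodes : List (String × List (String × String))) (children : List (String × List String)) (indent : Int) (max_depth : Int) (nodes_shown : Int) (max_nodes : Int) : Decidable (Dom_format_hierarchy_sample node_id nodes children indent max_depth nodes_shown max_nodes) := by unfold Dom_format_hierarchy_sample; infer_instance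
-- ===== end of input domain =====

-- B replaces A's recursion by an iterative DFS over an explicit stack of frames (alternative
-- decomposition, same cost); return-value equivalence is proved on the whole domain.


-- ===== PORT A =====
-- Literal port of A's recursion; the for-loop over the (at most 3) sampled children is the
-- structural recursion fhsLoop over the same state (result, nodes_shown).
mutual
def format_hierarchy_sample (node_id : String) (nodes : List (String × List (String × String))) (children : List (String × List String)) (indent : Int) (max_depth : Int) (nodes_shown : Int) (max_nodes : Int) : String :=
  if indent > max_depth ∨ nodes_shown ≥ max_nodes then ""
  else
    let node_info := PySem.Dict.getD (PySem.Dict.mk nodes) node_id []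
    let desc := PySem.Dict.getD (PySem.Dict.mk node_info) "desc" ""
    let pfx := String.ofList (PySem.List.pyRepeat "  ".toList indent)
    let result := pfx ++ node_id ++ ": " ++ desc ++ "\n"
    let node_children := PySem.List.slice (PySem.Dict.getD (PySem.Dict.mk children) node_id []) none (some 3)
    let result := fhsLoop node_children nodes children indent max_depth nodes_shown max_nodes result
    if ((PySem.Dict.getD (PySem.Dict.mk children) node_id []).length : Int) > 3 then
      result ++ pfx ++ "  ... (" ++ PySem.Int.toStr (((PySem.Dict.getD (PySem.Dict.mk children) node_id []).length : Int) - 3) ++ " more children)\n"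
    else result
termination_by ((max_depth + 1 - indent).toNat, 0, 0)
decreasing_by
  apply Prod.Lex.left; omega

def fhsLoop (cs : List String) (nodes : List (String × List (String × String))) (children : List (String × List String)) (indent : Int) (max_depth : Int) (nodes_shown : Int) (max_nodes : Int) (result : String) : String :=
  match cs with
  | [] => result
  | child_id :: rest =>
    if nodes_shown < max_nodes then
      fhsLoop rest nodes children indent max_depth (nodes_shown + 1) max_nodes
        (result ++ format_hierarchy_sample child_id nodes children (indent + 1) max_depth nodes_shown max_nodes)
    else
      fhsLoop rest nodes children indent max_depth nodes_shown max_nodes result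
termination_by ((max_depth - indent).toNat, 1, cs.length)
decreasing_by
  · have h : (max_depth + 1 - (indent + 1)).toNat = (max_depth - indent).toNat := by omega
    rw [h]; apply Prod.Lex.right; apply Prod.Lex.left; omega
  · apply Prod.Lex.right; apply Prod.Lex.right; simp [List.length_cons]
  · apply Prod.Lex.right; apply Prod.Lex.right; simp [List.length_cons]
end

-- ===== PORT B =====
-- B: iterative DFS; the stack holds node frames and deferred text frames.
inductive PVFrame where
  | node : String → Int → Int → PVFrame
  | text : String → PVFrame
deriving DecidableEq, Repr

def pvFrameWeight (max_depth : Int) : PVFrame → Nat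
  | .node _ ind _ => 2 * 4 ^ (max_depth + 1 - ind).toNat
  | .text _ => 1

def pvStackWeight (max_depth : Int) (fs : List PVFrame) : Nat :=
  (fs.map (pvFrameWeight max_depth)).sum

-- 'for frame in reversed(new_frames): stack.append(frame)' is prepending new_frames
theorem pvPush (l st : List PVFrame) :
    l.reverse.foldl (fun st f => f :: st) st = l ++ st := by
  induction l generalizing st with
  | nil => rfl
  | cons x xs ih =>
    simp [List.foldl_append, ih]

theorem pvStackWeight_append (md : Int) (l₁ l₂ : List PVFrame) :
    pvStackWeight md (l₁ ++ l₂) = pvStackWeight md l₁ + pvStackWeight md l₂ := by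
  simp [pvStackWeight]

theorem pvStackWeight_cons (md : Int) (f : PVFrame) (fs : List PVFrame) :
    pvStackWeight md (f :: fs) = pvFrameWeight md f + pvStackWeight md fs := by
  simp [pvStackWeight]

theorem pvStackWeight_nodes (md ind : Int) (f : Int × String → Int) (l : List (Int × String)) :
    pvStackWeight md (l.map (fun p => PVFrame.node p.2 ind (f p)))
      = l.length * (2 * 4 ^ (md + 1 - ind).toNat) := by
  induction l with
  | nil => simp [pvStackWeight]
  | cons x xs ih =>
    have hw : pvFrameWeight md (PVFrame.node x.2 ind (f x)) = 2 * 4 ^ (md + 1 - ind).toNat := rfl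
    rw [List.map_cons, pvStackWeight_cons, ih, List.length_cons, hw]
    ring

def pvRun (nodes : List (String × List (String × String))) (children : List (String × List String)) (max_depth : Int) (max_nodes : Int) (stack : List PVFrame) (out : List String) : List String :=
  match stack with
  | [] => out
  | PVFrame.text s :: rest => pvRun nodes children max_depth max_nodes rest (out ++ [s])
  | PVFrame.node nid ind shown :: rest =>
    if ind > max_depth ∨ shown ≥ max_nodes then
      pvRun nodes children max_depth max_nodes rest out
    else
      let desc := PySem.Dict.getD (PySem.Dict.mk (PySem.Dict.getD (PySem.Dict.mk nodes) nid [])) "desc" ""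
      let pfx := String.ofList (PySem.List.pyRepeat "  ".toList ind)
      let out' := out ++ [pfx ++ nid ++ ": " ++ desc ++ "\n"]
      let kids := PySem.Dict.getD (PySem.Dict.mk children) nid []
      let stack1 := if ((kids.length : Int)) > 3 then
          PVFrame.text (pfx ++ "  ... (" ++ PySem.Int.toStr ((kids.length : Int) - 3) ++ " more children)\n") :: rest
        else rest
      let newFrames := (PySem.List.enumerate (PySem.List.slice kids none (some 3))).map
          (fun p => PVFrame.node p.2 (ind + 1) (shown + p.1))
      pvRun nodes children max_depth max_nodes (newFrames.reverse.foldl (fun st f => f :: st) stack1) out'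
termination_by pvStackWeight max_depth stack
decreasing_by
  · simp only [pvStackWeight_cons, pvFrameWeight]
    omega
  · simp only [pvStackWeight_cons, pvFrameWeight]
    have : 1 ≤ 4 ^ (max_depth + 1 - ind).toNat := Nat.one_le_pow _ _ (by omega)
    omega
  · rename_i hguard
    rw [pvPush, pvStackWeight_append,
      pvStackWeight_nodes max_depth (ind + 1) (fun p => shown + p.1), pvStackWeight_cons]
    simp only [pvFrameWeight]
    simp only [not_or, not_lt, not_le] at hguard
    have hd : (max_depth + 1 - (ind + 1)).toNat + 1 = (max_depth + 1 - ind).toNat := by omega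
    set t := 4 ^ (max_depth + 1 - (ind + 1)).toNat with ht
    have ht1 : 1 ≤ t := Nat.one_le_pow _ _ (by omega)
    have h4 : 4 ^ (max_depth + 1 - ind).toNat = 4 * t := by
      rw [← hd, pow_succ]; ring
    have hlen : ((PySem.List.enumerate (PySem.List.slice (PySem.Dict.getD (PySem.Dict.mk children) nid []) none (some 3))).length) ≤ 3 := by
      rw [PySem.List.length_enumerate,
        PySem.List.slice_to (PySem.Dict.getD (PySem.Dict.mk children) nid []) (by omega : (0:Int) ≤ 3)]
      simp [List.length_take]
    have hmul := Nat.mul_le_mul_right (2 * t) hlen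
    split
    · simp only [pvStackWeight_cons, pvFrameWeight]
      rw [h4]; omega
    · rw [h4]; omega

def format_hierarchy_sample_alt (node_id : String) (nodes : List (String × List (String × String))) (children : List (String × List String)) (indent : Int) (max_depth : Int) (nodes_shown : Int) (max_nodes : Int) : String :=
  PySem.Str.join "" (pvRun nodes children max_depth max_nodes [PVFrame.node node_id indent nodes_shown] [])

-- ===== PRECONDITION & SPEC =====
def Spec_format_hierarchy_sample (node_id : String) (nodes : List (String × List (String × String))) (children : List (String × List String)) (indent : Int) (max_depth : Int) (nodes_shown : Int) (max_nodes : Int) (out : String) : Prop := out = format_hierarchy_sample_alt node_id nodes children indent max_depth nodes_shown max_nodes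
instance (node_id : String) (nodes : List (String × List (String × String))) (children : List (String × List String)) (indent : Int) (max_depth : Int) (nodes_shown : Int) (max_nodes : Int) (out : String) : Decidable (Spec_format_hierarchy_sample node_id nodes children indent max_depth nodes_shown max_nodes out) := by unfold Spec_format_hierarchy_sample; infer_instance

-- ===== CLAIM (what is proved, stated in full; the proofs are below) =====
def Claim_equal_format_hierarchy_sample : Prop := ∀ (node_id : String) (nodes : List (String × List (String × String))) (children : List (String × List String)) (indent : Int) (max_depth : Int) (nodes_shown : Int) (max_nodes : Int), Dom_format_hierarchy_sample node_id nodes children indent max_depth nodes_shown max_nodes → Spec_format_hierarchy_sample node_id nodes children indent max_depth nodes_shown max_nodes (format_hierarchy_sample node_id nodes children indent max_depth nodes_shown max_nodes)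

-- ===== LEMMAS AND PROOFS =====

-- plain concatenation of a list of strings
def pvCat (l : List String) : String := l.foldr (· ++ ·) ""

theorem pvCat_cons (x : String) (l : List String) : pvCat (x :: l) = x ++ pvCat l := rfl

theorem pvCat_append (l₁ l₂ : List String) : pvCat (l₁ ++ l₂) = pvCat l₁ ++ pvCat l₂ := by
  induction l₁ with
  | nil => simp [pvCat, String.empty_append]
  | cons x xs ih =>
    rw [List.cons_append, pvCat_cons, pvCat_cons, ih, String.append_assoc]

theorem pvJoin_eq_pvCat (l : List String) : PySem.Str.join "" l = pvCat l := by
  apply String.toList_inj.mp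
  rw [PySem.Str.toList_join]
  induction l with
  | nil => simp [PySem.Chars.join_nil, pvCat]
  | cons x xs ih =>
    cases xs with
    | nil => simp [PySem.Chars.join_singleton, pvCat]
    | cons y ys =>
      simp only [List.map_cons] at ih ⊢
      rw [PySem.Chars.join_cons_cons, pvCat_cons]
      simp at ih ⊢
      simp [ih]

-- what one frame contributes to the output
def pvDenote (nodes : List (String × List (String × String))) (children : List (String × List String)) (max_depth : Int) (max_nodes : Int) : PVFrame → String
  | .node nid ind shown => format_hierarchy_sample nid nodes children ind max_depth shown max_nodes
  | .text s => s

theorem fhs_guard (node_id : String) (nodes : List (String × List (String × String))) (children : List (String × List String)) (indent max_depth nodes_shown max_nodes : Int)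
    (h : indent > max_depth ∨ nodes_shown ≥ max_nodes) :
    format_hierarchy_sample node_id nodes children indent max_depth nodes_shown max_nodes = "" := by
  rw [format_hierarchy_sample]
  simp only [if_pos h]

theorem pvEnum_dead (nodes : List (String × List (String × String))) (children : List (String × List String)) (indent max_depth max_nodes : Int)
    (cs : List String) : ∀ (s sh : Int), sh ≥ max_nodes →
    pvCat ((PySem.List.enumerate cs s).map
      (fun p => format_hierarchy_sample p.2 nodes children (indent + 1) max_depth (sh + (p.1 - s)) max_nodes)) = "" := by
  induction cs with
  | nil => intro s sh _; rw [PySem.List.enumerate_nil]; rfl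
  | cons c cs ih =>
    intro s sh hsh
    rw [PySem.List.enumerate_cons, List.map_cons, pvCat_cons]
    have h1 : format_hierarchy_sample c nodes children (indent + 1) max_depth (sh + (s - s)) max_nodes = "" :=
      fhs_guard _ _ _ _ _ _ _ (Or.inr (by omega))
    have hfun : (fun p : Int × String => format_hierarchy_sample p.2 nodes children (indent + 1) max_depth (sh + (p.1 - s)) max_nodes)
        = (fun p : Int × String => format_hierarchy_sample p.2 nodes children (indent + 1) max_depth ((sh + 1) + (p.1 - (s + 1))) max_nodes) := by
      funext p; congr 1; omega
    rw [h1, hfun, ih (s + 1) (sh + 1) (by omega), String.empty_append]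

theorem fhsLoop_char (nodes : List (String × List (String × String))) (children : List (String × List String)) (indent max_depth max_nodes : Int) (cs : List String) :
    ∀ (s sh : Int) (acc : String),
    fhsLoop cs nodes children indent max_depth sh max_nodes acc
      = acc ++ pvCat ((PySem.List.enumerate cs s).map
          (fun p => format_hierarchy_sample p.2 nodes children (indent + 1) max_depth (sh + (p.1 - s)) max_nodes)) := by
  induction cs with
  | nil =>
    intro s sh acc
    rw [fhsLoop, PySem.List.enumerate_nil]
    show acc = acc ++ pvCat []
    rw [show pvCat [] = "" from rfl, String.append_empty]
  | cons c cs ih =>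
    intro s sh acc
    rw [fhsLoop, PySem.List.enumerate_cons, List.map_cons, pvCat_cons]
    have hfun : (fun p : Int × String => format_hierarchy_sample p.2 nodes children (indent + 1) max_depth (sh + (p.1 - s)) max_nodes)
        = (fun p : Int × String => format_hierarchy_sample p.2 nodes children (indent + 1) max_depth ((sh + 1) + (p.1 - (s + 1))) max_nodes) := by
      funext p; congr 1; omega
    split
    · rename_i hlt
      rw [ih (s + 1) (sh + 1)]
      have hs : sh + (s - s) = sh := by omega
      rw [hs, hfun, String.append_assoc]
    · rename_i hge
      rw [ih (s + 1) sh]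
      have h1 : format_hierarchy_sample c nodes children (indent + 1) max_depth (sh + (s - s)) max_nodes = "" :=
        fhs_guard _ _ _ _ _ _ _ (Or.inr (by omega))
      rw [h1, String.empty_append]
      have hfun2 : (fun p : Int × String => format_hierarchy_sample p.2 nodes children (indent + 1) max_depth (sh + (p.1 - (s + 1))) max_nodes)
          = (fun p : Int × String => format_hierarchy_sample p.2 nodes children (indent + 1) max_depth ((sh - 1) + (p.1 - s)) max_nodes) := by
        funext p; congr 1; omega
      rw [pvEnum_dead nodes children indent max_depth max_nodes cs (s + 1) sh (by omega)]
      rw [hfun]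
      rw [pvEnum_dead nodes children indent max_depth max_nodes cs (s + 1) (sh + 1) (by omega)]

-- abbreviations for the pieces of one formatted node
def pvKids (children : List (String × List String)) (nid : String) : List String :=
  PySem.Dict.getD (PySem.Dict.mk children) nid []

def pvLine (nodes : List (String × List (String × String))) (nid : String) (ind : Int) : String :=
  String.ofList (PySem.List.pyRepeat "  ".toList ind) ++ nid ++ ": " ++
    PySem.Dict.getD (PySem.Dict.mk (PySem.Dict.getD (PySem.Dict.mk nodes) nid [])) "desc" "" ++ "\n"

def pvSfx (children : List (String × List String)) (nid : String) (ind : Int) : String :=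
  String.ofList (PySem.List.pyRepeat "  ".toList ind) ++ "  ... (" ++
    PySem.Int.toStr (((pvKids children nid).length : Int) - 3) ++ " more children)\n"

theorem fhsLoop_char0 (nodes : List (String × List (String × String))) (children : List (String × List String)) (indent max_depth max_nodes : Int) (cs : List String) (sh : Int) (acc : String) :
    fhsLoop cs nodes children indent max_depth sh max_nodes acc
      = acc ++ pvCat ((PySem.List.enumerate cs).map
          (fun p => format_hierarchy_sample p.2 nodes children (indent + 1) max_depth (sh + p.1) max_nodes)) := by
  rw [fhsLoop_char nodes children indent max_depth max_nodes cs 0 sh acc]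
  have hfun : (fun p : Int × String => format_hierarchy_sample p.2 nodes children (indent + 1) max_depth (sh + (p.1 - 0)) max_nodes)
      = (fun p : Int × String => format_hierarchy_sample p.2 nodes children (indent + 1) max_depth (sh + p.1) max_nodes) := by
    funext p; congr 1; omega
  rw [hfun]

theorem fhs_unfold (nid : String) (nodes : List (String × List (String × String))) (children : List (String × List String)) (ind md sh mn : Int)
    (hg : ¬(ind > md ∨ sh ≥ mn)) :
    format_hierarchy_sample nid nodes children ind md sh mn
      = pvLine nodes nid ind
        ++ pvCat ((PySem.List.enumerate (PySem.List.slice (pvKids children nid) none (some 3))).map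
            (fun p => format_hierarchy_sample p.2 nodes children (ind + 1) md (sh + p.1) mn))
        ++ (if ((pvKids children nid).length : Int) > 3 then pvSfx children nid ind else "") := by
  rw [format_hierarchy_sample, if_neg hg]
  simp only [fhsLoop_char0, pvKids, pvLine, pvSfx]
  split
  · simp [String.append_assoc]
  · simp [String.append_assoc]

theorem pvRun_denote (nodes : List (String × List (String × String))) (children : List (String × List String)) (max_depth max_nodes : Int) :
    ∀ (stack : List PVFrame) (out : List String),
    pvCat (pvRun nodes children max_depth max_nodes stack out)
      = pvCat out ++ pvCat (stack.map (pvDenote nodes children max_depth max_nodes)) := by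
  intro stack out
  induction stack, out using pvRun.induct nodes children max_depth max_nodes
  case case1 out =>
    rw [pvRun]
    simp [pvCat, String.append_empty]
  case case2 out s rest ih =>
    rw [pvRun, ih, pvCat_append]
    simp [pvCat, pvDenote, String.append_assoc, String.append_empty]
  case case3 out nid ind shown rest hg ih =>
    rw [pvRun, if_pos hg, ih, List.map_cons, pvCat_cons,
      show pvDenote nodes children max_depth max_nodes (PVFrame.node nid ind shown)
        = format_hierarchy_sample nid nodes children ind max_depth shown max_nodes from rfl,
      fhs_guard nid nodes children ind max_depth shown max_nodes hg, String.empty_append]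
  case case4 out nid ind shown rest hg desc pfx out' kids stack1 newFrames ih =>
    have step : pvCat (pvRun nodes children max_depth max_nodes (PVFrame.node nid ind shown :: rest) out)
        = pvCat out' ++ pvCat (List.map (pvDenote nodes children max_depth max_nodes) (newFrames ++ stack1)) := by
      rw [pvRun, if_neg hg, ← pvPush newFrames stack1]
      exact ih
    rw [step]
    rw [show out' = out ++ [pvLine nodes nid ind] from rfl]
    rw [pvCat_append, List.map_append, pvCat_append, List.map_cons,
      show pvCat [pvLine nodes nid ind] = pvLine nodes nid ind ++ "" from rfl, String.append_empty,
      pvCat_cons]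
    rw [show pvDenote nodes children max_depth max_nodes (PVFrame.node nid ind shown)
        = format_hierarchy_sample nid nodes children ind max_depth shown max_nodes from rfl,
      fhs_unfold nid nodes children ind max_depth shown max_nodes hg]
    have hnew : List.map (pvDenote nodes children max_depth max_nodes) newFrames
        = (PySem.List.enumerate (PySem.List.slice (pvKids children nid) none (some 3))).map
            (fun p => format_hierarchy_sample p.2 nodes children (ind + 1) max_depth (shown + p.1) max_nodes) := by
      rw [show newFrames = (PySem.List.enumerate (PySem.List.slice (pvKids children nid) none (some 3))).map
            (fun p => PVFrame.node p.2 (ind + 1) (shown + p.1)) from rfl, List.map_map]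
      rfl
    rw [hnew]
    by_cases hc : ((pvKids children nid).length : Int) > 3
    · have hst : stack1 = PVFrame.text (pvSfx children nid ind) :: rest := if_pos hc
      rw [hst, if_pos hc, List.map_cons, pvCat_cons,
        show pvDenote nodes children max_depth max_nodes (PVFrame.text (pvSfx children nid ind)) = pvSfx children nid ind from rfl]
      simp [String.append_assoc]
    · have hst : stack1 = rest := if_neg hc
      rw [hst, if_neg hc, String.append_empty]
      simp [String.append_assoc]

-- ===== VERDICT (by name: the statement is the Claim_ definition above) =====
theorem format_hierarchy_sample_spec : Claim_equal_format_hierarchy_sample := by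
  intro node_id nodes children indent max_depth nodes_shown max_nodes _
  unfold Spec_format_hierarchy_sample format_hierarchy_sample_alt
  rw [pvJoin_eq_pvCat, pvRun_denote]
  simp [pvCat, pvDenote]
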